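-- pv_equiv track=rewrite | github.com/Redvarik/pythonProject2 | Информатикс/112301.py | left_rotate_subarray
-- ===== SOURCE A (Python) =====
-- def left_rotate_subarray(arr, n, k, m, r):
--     k -= 1
--     m -= 1
--     sub_len = m - k + 1
--     r %= sub_len
--
--     for _ in range(r):
--         first_element = arr[k]
--         for i in range(k, m):
--             arr[i] = arr[i + 1]
--         arr[m] = first_element
--
--     return arr
-- ===== SOURCE B (Python) =====
-- def left_rotate_subarray(arr, n, k, m, r):
--     k -= 1
--     m -= 1
--     sub_len = m - k + 1
--     r %= sub_len
--
--     def rev(i, j):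
--         while i < j:
--             arr[i], arr[j] = arr[j], arr[i]
--             i += 1
--             j -= 1
--
--     rev(k, k + r - 1)
--     rev(k + r, m)
--     rev(k, m)
--     return arr
-- ===== Notes on version B (the rewrite author's own statement) =====
-- stated objective: alternative
-- what changed: Replaces A's r repeated one-step shifts of the subarray (each an inner pass) with the classic three-reversal rotation done by in-place two-pointer swaps.
-- outside the precondition, e.g. on left_rotate_subarray([1, 2, 3], 3, 0, 3, 1): A returns [2, 1, 3], B returns [2, 3, 1]; on left_rotate_subarray([1], 1, 1, 3, 0): A returns [1], B raises IndexError
import Mathlib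
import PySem

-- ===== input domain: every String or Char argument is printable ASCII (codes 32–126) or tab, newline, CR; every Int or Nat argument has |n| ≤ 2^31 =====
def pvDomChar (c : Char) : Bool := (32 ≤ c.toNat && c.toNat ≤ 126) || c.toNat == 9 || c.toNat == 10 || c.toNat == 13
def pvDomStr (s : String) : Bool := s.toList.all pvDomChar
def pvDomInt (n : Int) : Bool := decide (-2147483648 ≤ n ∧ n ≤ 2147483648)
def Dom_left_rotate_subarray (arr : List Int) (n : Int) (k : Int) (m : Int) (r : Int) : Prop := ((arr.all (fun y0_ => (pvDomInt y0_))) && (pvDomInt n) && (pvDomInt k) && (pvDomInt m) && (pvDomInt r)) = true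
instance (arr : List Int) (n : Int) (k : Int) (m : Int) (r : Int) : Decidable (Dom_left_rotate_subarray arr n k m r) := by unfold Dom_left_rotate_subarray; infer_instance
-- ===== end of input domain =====

-- B replaces A's r repeated one-step shifts of the subarray with the classic three-reversal
-- rotation done by in-place two-pointer swaps.

-- ===== PORT A =====
-- one body of A's outer loop: fetch arr[k], shift arr[k..m-1] left by one, write arr[m]
def pyPass (k : Int) (m : Int) (arr : List Int) : List Int :=
  let first := PySem.List.pyGetD arr k 0
  let arr := (PySem.List.pyRange k m 1).foldl
    (fun a i => PySem.List.pySetD a i (PySem.List.pyGetD a (i + 1) 0)) arr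
  PySem.List.pySetD arr m first

def left_rotate_subarray (arr : List Int) (n : Int) (k : Int) (m : Int) (r : Int) : List Int :=
  let k := k - 1
  let m := m - 1
  let sub_len := m - k + 1
  let r := PySem.Int.mod r sub_len
  (PySem.List.pyRange 0 r 1).foldl (fun a _ => pyPass k m a) arr

-- ===== PORT B =====
-- B's helper rev(i, j): two-pointer swap loop reversing arr[i..j] in place
def revSeg (arr : List Int) (i : Int) (j : Int) : List Int :=
  if i < j then
    let ai := PySem.List.pyGetD arr i 0
    let aj := PySem.List.pyGetD arr j 0
    revSeg (PySem.List.pySetD (PySem.List.pySetD arr i aj) j ai) (i + 1) (j - 1)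
  else arr
termination_by (j - i).toNat
decreasing_by omega

def left_rotate_subarray_alt (arr : List Int) (n : Int) (k : Int) (m : Int) (r : Int) : List Int :=
  let k := k - 1
  let m := m - 1
  let sub_len := m - k + 1
  let r := PySem.Int.mod r sub_len
  let arr := revSeg arr k (k + r - 1)
  let arr := revSeg arr (k + r) m
  revSeg arr k m

-- ===== PRECONDITION & SPEC =====
-- Pre_ excludes: k = m + 1 (sub_len = 0, A raises ZeroDivisionError); m > len(arr) with k ≤ m
-- (A raises IndexError, except that when r % sub_len == 0 the loop never runs and A accidentally
-- returns arr while B raises); and k < 1 with k ≤ m (Python's negative-index wraparound makes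
-- both A's and B's results accidental artefacts of their loop shapes, and they differ).
-- The second disjunct keeps the k ≥ m + 2 inputs, where sub_len < 0, r % sub_len ≤ 0,
-- no loop body runs in either program and both return arr unchanged.
def Pre_left_rotate_subarray (arr : List Int) (n : Int) (k : Int) (m : Int) (r : Int) : Prop :=
  (1 ≤ k ∧ k ≤ m ∧ m ≤ (arr.length : Int)) ∨ m + 2 ≤ k
instance (arr : List Int) (n : Int) (k : Int) (m : Int) (r : Int) : Decidable (Pre_left_rotate_subarray arr n k m r) := by unfold Pre_left_rotate_subarray; infer_instance
def pvWitness_left_rotate_subarray : List Int × Int × Int × Int × Int := ([5, 1, 4, 2, 3], 5, 2, 4, 7)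

def Spec_left_rotate_subarray (arr : List Int) (n : Int) (k : Int) (m : Int) (r : Int) (out : List Int) : Prop := out = left_rotate_subarray_alt arr n k m r
instance (arr : List Int) (n : Int) (k : Int) (m : Int) (r : Int) (out : List Int) : Decidable (Spec_left_rotate_subarray arr n k m r out) := by unfold Spec_left_rotate_subarray; infer_instance

-- ===== CLAIM (what is proved, stated in full; the proofs are below) =====
def Claim_equal_left_rotate_subarray : Prop := ∀ (arr : List Int) (n : Int) (k : Int) (m : Int) (r : Int), Dom_left_rotate_subarray arr n k m r → Pre_left_rotate_subarray arr n k m r → Spec_left_rotate_subarray arr n k m r (left_rotate_subarray arr n k m r)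

-- ===== LEMMAS AND PROOFS =====

-- reading/writing at the junction of an append
lemma getAt (P : List Int) (x : Int) (t : List Int) (i : Int) (hi : i = (P.length : Int)) :
    PySem.List.pyGetD (P ++ x :: t) i 0 = x := by
  subst hi
  simp [PySem.List.pyGetD_natCast, List.getD]

lemma setAt (P : List Int) (x v : Int) (t : List Int) (i : Int) (hi : i = (P.length : Int)) :
    PySem.List.pySetD (P ++ x :: t) i v = P ++ v :: t := by
  subst hi
  rw [PySem.List.pySetD_natCast]
  induction P with
  | nil => simp
  | cons p ps ih => simp [ih]

-- A's inner loop shifts the segment xs one place left (duplicating its last element)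
lemma innerA : ∀ (xs P : List Int) (x : Int) (S : List Int) (a b : Int),
    a = (P.length : Int) → b = a + (xs.length : Int) →
    (PySem.List.pyRange a b 1).foldl
      (fun l i => PySem.List.pySetD l i (PySem.List.pyGetD l (i + 1) 0)) (P ++ x :: (xs ++ S))
    = P ++ (xs ++ xs.getLastD x :: S) := by
  intro xs
  induction xs with
  | nil =>
    intro P x S a b ha hb
    rw [PySem.List.pyRange_one_eq_nil (by simp at hb; omega)]
    simp
  | cons y ys ih =>
    intro P x S a b ha hb
    rw [PySem.List.pyRange_one_cons (by simp at hb; omega)]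
    simp only [List.foldl_cons]
    have h1 : PySem.List.pyGetD (P ++ x :: (y :: ys ++ S)) (a + 1) 0 = y := by
      have : P ++ x :: (y :: ys ++ S) = (P ++ [x]) ++ y :: (ys ++ S) := by simp
      rw [this, getAt]
      simp [ha]
    rw [h1, setAt P x y _ a ha]
    have h2 : P ++ y :: (y :: ys ++ S) = (P ++ [y]) ++ y :: (ys ++ S) := by simp
    rw [h2, ih (P ++ [y]) y S (a + 1) b (by simp [ha]) (by simp at hb ⊢; omega)]
    have hlast : (y :: ys).getLastD x = ys.getLastD y := List.getLastD_cons
    rw [hlast]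
    simp

-- one pass of A's outer loop rotates the segment left by one
lemma passA (P : List Int) (x : Int) (xs S : List Int) (a b : Int)
    (ha : a = (P.length : Int)) (hb : b = a + (xs.length : Int)) :
    pyPass a b (P ++ x :: (xs ++ S)) = P ++ (xs ++ x :: S) := by
  unfold pyPass
  rw [getAt P x _ a ha, innerA xs P x S a b ha hb]
  have : P ++ (xs ++ xs.getLastD x :: S) = (P ++ xs) ++ xs.getLastD x :: S := by simp
  rw [this, setAt (P ++ xs) _ x S b (by simp [hb, ha])]
  simp

-- A's outer loop performs r' single rotations
lemma outerA : ∀ (r' : Nat) (P M S : List Int) (a b : Int),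
    M ≠ [] → a = (P.length : Int) → b = a + (M.length : Int) - 1 →
    (PySem.List.pyRange 0 (r' : Int) 1).foldl (fun l _ => pyPass a b l) (P ++ (M ++ S))
    = P ++ (M.rotate r' ++ S) := by
  intro r'
  induction r' with
  | zero =>
    intro P M S a b hM ha hb
    rw [PySem.List.pyRange_one_eq_nil (by omega)]
    simp
  | succ q ih =>
    intro P M S a b hM ha hb
    have hcast : ((q + 1 : Nat) : Int) = (q : Int) + 1 := by push_cast; ring
    rw [hcast, PySem.List.pyRange_one_succ_right (by omega), List.foldl_append]
    rw [ih P M S a b hM ha hb]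
    simp only [List.foldl_cons, List.foldl_nil]
    have hlen : (M.rotate q).length = M.length := List.length_rotate M q
    obtain ⟨y, ys, hys⟩ := List.exists_cons_of_ne_nil
      (by simpa [← List.length_pos_iff_ne_nil, hlen] using List.length_pos_iff_ne_nil.mpr hM :
        M.rotate q ≠ [])
    rw [hys]
    have : P ++ (y :: ys ++ S) = P ++ y :: (ys ++ S) := by simp
    rw [this, passA P y ys S a b ha (by
      have := hlen; rw [hys] at this; simp at this; omega)]
    have hrot : M.rotate (q + 1) = ys ++ [y] := by
      rw [← List.rotate_rotate, hys]
      simp [List.rotate_cons_succ ys y 0]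
    rw [hrot]
    simp

-- B's rev(i, j) reverses the segment M
lemma revSeg_spec : ∀ (fuel : Nat) (M P S : List Int) (i j : Int),
    M.length ≤ fuel → i = (P.length : Int) → j = i + (M.length : Int) - 1 →
    revSeg (P ++ (M ++ S)) i j = P ++ (M.reverse ++ S) := by
  intro fuel
  induction fuel with
  | zero =>
    intro M P S i j hf hi hj
    have : M = [] := List.length_eq_zero_iff.mp (by omega)
    subst this
    rw [revSeg]
    simp at hj
    simp [hj, hi]
  | succ f ih =>
    intro M P S i j hf hi hj
    by_cases hlen : M.length ≤ 1
    · rw [revSeg]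
      have hnot : ¬ i < j := by omega
      rw [if_neg hnot]
      interval_cases h : M.length
      · have : M = [] := List.length_eq_zero_iff.mp h
        subst this; simp
      · obtain ⟨z, hz⟩ := List.length_eq_one_iff.mp h
        subst hz; simp
    · -- M has ≥ 2 elements: M = x :: (mid ++ [y])
      obtain ⟨x, xs, hx⟩ := List.exists_cons_of_ne_nil
        (by rw [← List.length_pos_iff_ne_nil]; omega : M ≠ [])
      have hxs : xs ≠ [] := by
        rw [← List.length_pos_iff_ne_nil]
        have := hx ▸ hlen; simp [hx] at hlen ⊢
        rcases xs with _ | _ <;> simp_all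
      obtain ⟨mid, y, hy⟩ := List.eq_nil_or_concat xs |>.resolve_left hxs
      rw [List.concat_eq_append] at hy
      subst hy; subst hx
      rw [revSeg]
      have hMlen : ((x :: (mid ++ [y])).length : Int) = (mid.length : Int) + 2 := by
        simp; omega
      rw [if_pos (by rw [hMlen] at hj; omega)]
      have harr : P ++ ((x :: (mid ++ [y])) ++ S) = P ++ x :: (mid ++ y :: S) := by simp
      rw [harr]
      have hai : PySem.List.pyGetD (P ++ x :: (mid ++ y :: S)) i 0 = x := getAt _ _ _ _ hi
      have hsplit : P ++ x :: (mid ++ y :: S) = (P ++ x :: mid) ++ y :: S := by simp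
      have hjlen : j = ((P ++ x :: mid).length : Int) := by
        rw [hMlen] at hj; simp [hi] at hj ⊢; omega
      have haj : PySem.List.pyGetD (P ++ x :: (mid ++ y :: S)) j 0 = y := by
        rw [hsplit]; exact getAt _ _ _ _ hjlen
      rw [hai, haj]
      dsimp only
      rw [setAt P x y _ i hi]
      have h2 : P ++ y :: (mid ++ y :: S) = (P ++ y :: mid) ++ y :: S := by simp
      rw [h2, setAt _ y x S j (by simpa using hjlen)]
      have h3 : (P ++ y :: mid) ++ x :: S = (P ++ [y]) ++ (mid ++ (x :: S)) := by simp
      rw [h3, ih mid (P ++ [y]) (x :: S) (i + 1) (j - 1)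
        (by simp at hf ⊢; omega) (by simp [hi]) (by rw [hMlen] at hj; simp [hi] at hj ⊢; omega)]
      simp

-- ===== VERDICT (by name: the statement is the Claim_ definition above) =====
theorem left_rotate_subarray_spec : Claim_equal_left_rotate_subarray := by
  intro arr n k m r _ hpre
  unfold Spec_left_rotate_subarray left_rotate_subarray left_rotate_subarray_alt
  dsimp only
  rcases hpre with ⟨hk, hkm, hm⟩ | hrev
  · -- main case: 1 ≤ k ≤ m ≤ len arr
    set a : Nat := (k - 1).toNat with ha
    set b : Nat := (m - 1).toNat with hb
    have hka : k - 1 = (a : Int) := by omega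
    have hmb : m - 1 = (b : Int) := by omega
    have hab : a ≤ b := by omega
    have hblen : b < arr.length := by omega
    have hsub : m - 1 - (k - 1) + 1 = ((b - a + 1 : Nat) : Int) := by omega
    set r' : Nat := (PySem.Int.mod r ((b - a + 1 : Nat) : Int)).toNat with hr'
    have hpos : (0 : Int) < ((b - a + 1 : Nat) : Int) := by positivity
    have hrr : PySem.Int.mod r ((b - a + 1 : Nat) : Int) = (r' : Int) := by
      have := PySem.Int.mod_nonneg r (b := ((b - a + 1 : Nat) : Int)) hpos
      omega
    have hrlt : r' < b - a + 1 := by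
      have h1 := PySem.Int.mod_lt r (b := ((b - a + 1 : Nat) : Int)) hpos
      omega
    -- decompose arr into P ++ (M ++ S), the subarray M = arr[a..b]
    set P : List Int := arr.take a with hP
    set M : List Int := (arr.drop a).take (b - a + 1) with hM
    set S : List Int := (arr.drop a).drop (b - a + 1) with hS
    have hPlen : P.length = a := by rw [hP]; simp; omega
    have hMlen : M.length = b - a + 1 := by rw [hM]; simp; omega
    have hMne : M ≠ [] := by rw [← List.length_pos_iff_ne_nil, hMlen]; omega
    have harr : arr = P ++ (M ++ S) := by
      rw [hP, hM, hS, List.take_append_drop, List.take_append_drop]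
    -- split M at r'
    set M1 : List Int := M.take r' with hM1
    set M2 : List Int := M.drop r' with hM2
    have hM1len : M1.length = r' := by rw [hM1]; simp; omega
    have hM2len : M2.length = b - a + 1 - r' := by rw [hM2]; simp; omega
    have hM12 : M = M1 ++ M2 := (List.take_append_drop r' M).symm
    rw [hka, hmb]
    have hsub2 : (b : Int) - (a : Int) + 1 = ((b - a + 1 : Nat) : Int) := by omega
    rw [hsub2, hrr]
    -- A side
    have hA : (PySem.List.pyRange 0 (r' : Int) 1).foldl
        (fun l _ => pyPass (a : Int) (b : Int) l) arr = P ++ (M.rotate r' ++ S) := by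
      rw [harr]
      exact outerA r' P M S _ _ hMne (by rw [hPlen]) (by rw [hMlen]; push_cast; omega)
    rw [hA]
    -- B side: three reversals
    have h1 : revSeg arr ((a : Int)) ((a : Int) + (r' : Int) - 1)
        = P ++ (M1.reverse ++ (M2 ++ S)) := by
      rw [harr, hM12, List.append_assoc]
      exact revSeg_spec r' M1 P (M2 ++ S) _ _ (by omega) (by rw [hPlen]) (by rw [hM1len])
    have h2 : revSeg (P ++ (M1.reverse ++ (M2 ++ S))) ((a : Int) + (r' : Int)) ((b : Int))
        = (P ++ M1.reverse) ++ (M2.reverse ++ S) := by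
      have hre : P ++ (M1.reverse ++ (M2 ++ S)) = (P ++ M1.reverse) ++ (M2 ++ S) := by simp
      rw [hre]
      exact revSeg_spec M2.length M2 (P ++ M1.reverse) S _ _ (le_refl _)
        (by simp [hPlen, hM1len]) (by simp only [List.length_append, List.length_reverse, hM2len]; omega)
    have h3 : revSeg ((P ++ M1.reverse) ++ (M2.reverse ++ S)) ((a : Int)) ((b : Int))
        = P ++ ((M2 ++ M1) ++ S) := by
      have hre : (P ++ M1.reverse) ++ (M2.reverse ++ S)
          = P ++ ((M1.reverse ++ M2.reverse) ++ S) := by simp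
      rw [hre, revSeg_spec (M1.reverse ++ M2.reverse).length (M1.reverse ++ M2.reverse) P S _ _
        (le_refl _) (by rw [hPlen]) (by simp [hM1len, hM2len]; omega)]
      simp
    rw [h1, h2, h3]
    have hrot : M.rotate r' = M2 ++ M1 := by
      rw [List.rotate_eq_drop_append_take (by omega), ← hM1, ← hM2]
    rw [hrot]
  · -- k ≥ m + 2: sub_len < 0, r % sub_len ≤ 0, nothing moves in either program
    have hneg : m - 1 - (k - 1) + 1 < 0 := by omega
    obtain ⟨hlo, hhi⟩ := PySem.Int.mod_neg_bounds r (b := m - 1 - (k - 1) + 1) hneg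
    rw [PySem.List.pyRange_one_eq_nil (by omega)]
    simp only [List.foldl_nil]
    rw [revSeg, if_neg (by omega), revSeg, if_neg (by omega), revSeg, if_neg (by omega)]
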